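-- pv_equiv track=rewrite | github.com/seongeun42/Algorithm-Solved | 백준/Gold/14890. 경사로/경사로.py | garo
-- ===== SOURCE A (Python) =====
-- def garo(N, L, H):
--     cnt = N
--     for i in range(N):
--         h = H[i][0]
--         exist = [0] * N
--         flag = True
--         for j in range(N):
--             if abs(H[i][j] - h) > 1:
--                 flag = False
--                 break
--             elif H[i][j] - h == 1:
--                 if j - L < 0:
--                     flag = False
--                     break
--                 for k in range(L, 0, -1):
--                     if H[i][j - k] != h or exist[j - k] == 1:
--                         flag = False
--                         break
--                     exist[j - k] = 1
--                 if not flag: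
--                     break
--                 h = H[i][j]
--             elif H[i][j] - h == -1:
--                 if j + L - 1 >= N:
--                     flag = False
--                     break
--                 for k in range(L):
--                     if H[i][j + k] != h - 1 or exist[j + k] == 1:
--                         flag = False
--                         break
--                     exist[j + k] = 1
--                 if not flag:
--                     break
--                 h = H[i][j]
--         if not flag:
--             cnt -= 1
--     return cnt
-- ===== SOURCE B (Python) =====
-- def garo(N, L, H):
--     def runs_of(row):
--         # run-length encoding: maximal runs of equal height as (height, length)
--         runs = []
--         i = 0
--         while i < len(row):
--             j = i + 1
--             while j < len(row) and row[j] == row[i]: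
--                 j += 1
--             runs.append((row[i], j - i))
--             i = j
--         return runs
--
--     def row_ok(row):
--         runs = runs_of(row)
--         # consecutive maximal runs must differ in height by exactly 1
--         for k in range(1, len(runs)):
--             if abs(runs[k - 1][0] - runs[k][0]) != 1:
--                 return False
--         # each run must be long enough for the ramp ends claimed on it
--         prev = None
--         for idx in range(len(runs)):
--             h, ln = runs[idx]
--             need = 0
--             if prev is not None and h < prev:
--                 need += L
--             if idx + 1 < len(runs) and h < runs[idx + 1][0]:
--                 need += L
--             if need > ln:
--                 return False
--             prev = h
--         return True
--
--     bad = 0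
--     for i in range(N):
--         if not row_ok(H[i][:N]):
--             bad += 1
--     return N - bad
-- ===== Notes on version B (the rewrite author's own statement) =====
-- stated objective: alternative
-- what changed: B checks each row via its run-length encoding (consecutive maximal equal-height runs must differ by exactly 1, and each run must be at least L long per claimed ramp end, 2L when both ends are claimed) instead of A's cell-by-cell scan that backtracks and marks used cells in an exist array.
-- outside the precondition, e.g. on garo(3, 3, [[1, 2], [1, 2], [1, 2]]): A returns 0, B returns 0
import Mathlib
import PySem

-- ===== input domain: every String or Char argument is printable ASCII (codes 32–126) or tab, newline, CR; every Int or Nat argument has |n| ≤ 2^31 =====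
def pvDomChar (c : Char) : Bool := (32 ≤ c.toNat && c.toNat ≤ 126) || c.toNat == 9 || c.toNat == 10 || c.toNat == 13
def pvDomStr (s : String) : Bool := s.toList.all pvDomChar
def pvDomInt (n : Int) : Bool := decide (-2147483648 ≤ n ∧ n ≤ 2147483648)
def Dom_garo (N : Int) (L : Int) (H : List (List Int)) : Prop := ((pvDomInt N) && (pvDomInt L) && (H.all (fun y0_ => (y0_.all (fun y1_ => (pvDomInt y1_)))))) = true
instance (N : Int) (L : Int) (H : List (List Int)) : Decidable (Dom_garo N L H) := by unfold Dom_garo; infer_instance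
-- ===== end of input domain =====

-- B re-implements the row check by run-length encoding (maximal runs of equal height) instead of
-- A's cell-by-cell scan with an `exist` marker array; equal return values proved on Pre_garo.

-- ===== PORT A =====
-- body of `for k in range(L, 0, -1)` in the up-ramp branch (state: (exist, flag))
def garoUpBody (row : List Int) (j h : Int) (p : List Int × Bool) (k : Int) : List Int × Bool :=
  if p.2 = false then p
  else if PySem.List.pyGetD row (j - k) 0 ≠ h ∨ PySem.List.pyGetD p.1 (j - k) 0 = 1 then (p.1, false)
  else (PySem.List.pySetD p.1 (j - k) 1, true)

-- body of `for k in range(L)` in the down-ramp branch (state: (exist, flag))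
def garoDownBody (row : List Int) (j h : Int) (p : List Int × Bool) (k : Int) : List Int × Bool :=
  if p.2 = false then p
  else if PySem.List.pyGetD row (j + k) 0 ≠ h - 1 ∨ PySem.List.pyGetD p.1 (j + k) 0 = 1 then (p.1, false)
  else (PySem.List.pySetD p.1 (j + k) 1, true)

-- body of `for j in range(N)` (state: (h, exist, flag); `break` = flag false, later iterations skip)
def garoBody (N L : Int) (row : List Int) (st : Int × List Int × Bool) (j : Int) : Int × List Int × Bool :=
  if st.2.2 = false then st
  else
    let h := st.1
    let x := PySem.List.pyGetD row j 0
    if 1 < |x - h| then (h, st.2.1, false)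
    else if x - h = 1 then
      if j - L < 0 then (h, st.2.1, false)
      else
        let p := (PySem.List.pyRange L 0 (-1)).foldl (garoUpBody row j h) (st.2.1, true)
        if p.2 = false then (h, p.1, false)
        else (x, p.1, true)
    else if x - h = -1 then
      if N ≤ j + L - 1 then (h, st.2.1, false)
      else
        let p := (PySem.List.pyRange 0 L 1).foldl (garoDownBody row j h) (st.2.1, true)
        if p.2 = false then (h, p.1, false)
        else (x, p.1, true)
    else st

-- the body of `for i in range(N)`: h = H[i][0]; exist = [0]*N; flag = True; the j-loop; final flag
def garoRowFlag (N L : Int) (row : List Int) : Bool :=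
  ((PySem.List.pyRange 0 N 1).foldl (garoBody N L row)
    (PySem.List.pyGetD row 0 0, List.replicate N.toNat (0 : Int), true)).2.2

def garo (N : Int) (L : Int) (H : List (List Int)) : Int :=
  (PySem.List.pyRange 0 N 1).foldl (fun cnt i =>
    if garoRowFlag N L (PySem.List.pyGetD H i []) = false then cnt - 1 else cnt) N

-- ===== PORT B =====
-- run-length encoding: maximal runs (height, length), lengths as Python ints
def pvRuns : List Int → List (Int × Int)
  | [] => []
  | x :: xs =>
    (x, 1 + ((xs.takeWhile (fun y => y == x)).length : Int)) :: pvRuns (xs.dropWhile (fun y => y == x))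
  termination_by l => l.length
  decreasing_by
    simp only [List.length_cons]
    exact Nat.lt_succ_of_le (List.length_dropWhile_le _ _)

-- consecutive maximal runs must differ in height by exactly 1
def pvAdjOk : List (Int × Int) → Bool
  | (a, _) :: (b, m) :: rest => (|a - b| == 1) && pvAdjOk ((b, m) :: rest)
  | _ => true

-- each run must be long enough for the ramp ends claimed on it (prev run higher / next run higher)
def pvLenOk (L : Int) : Option Int → List (Int × Int) → Bool
  | _, [] => true
  | prev?, (h, ln) :: rest =>
    let need : Int :=
      (match prev? with | some p => if h < p then L else 0 | none => 0) +
      (match rest with | (h2, _) :: _ => if h < h2 then L else 0 | [] => 0)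
    (decide (need ≤ ln)) && pvLenOk L (some h) rest

def pvRowOk (L : Int) (row : List Int) : Bool :=
  pvAdjOk (pvRuns row) && pvLenOk L none (pvRuns row)

def garo_alt (N : Int) (L : Int) (H : List (List Int)) : Int :=
  N - (PySem.List.pyRange 0 N 1).foldl (fun bad i =>
        if pvRowOk L (PySem.List.slice (PySem.List.pyGetD H i []) none (some N)) then bad
        else bad + 1) 0

-- ===== PRECONDITION & SPEC =====
-- Pre_garo excludes the raising shapes (fewer than N rows, or a scanned row shorter than N);
-- A can still return on a short row it abandons early — see claim.json cites (B agrees there anyway).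
def Pre_garo (N : Int) (L : Int) (H : List (List Int)) : Prop :=
  N ≤ (H.length : Int) ∧ ∀ row ∈ H.take N.toNat, N ≤ (row.length : Int)
instance (N : Int) (L : Int) (H : List (List Int)) : Decidable (Pre_garo N L H) := by
  unfold Pre_garo; infer_instance

def pvWitness_garo : Int × Int × List (List Int) := (2, 1, [[1, 2], [2, 2]])

def Spec_garo (N : Int) (L : Int) (H : List (List Int)) (out : Int) : Prop := out = garo_alt N L H
instance (N : Int) (L : Int) (H : List (List Int)) (out : Int) : Decidable (Spec_garo N L H out) := by
  unfold Spec_garo; infer_instance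

-- ===== CLAIM (what is proved, stated in full; the proofs are below) =====
def Claim_equal_garo : Prop := ∀ (N : Int) (L : Int) (H : List (List Int)),
  Dom_garo N L H → Pre_garo N L H → Spec_garo N L H (garo N L H)

-- ===== LEMMAS AND PROOFS =====

lemma foldl_upBody_false (row : List Int) (j h : Int) (l : List Int) (e : List Int) :
    l.foldl (garoUpBody row j h) (e, false) = (e, false) := by
  induction l with
  | nil => rfl
  | cons k l ih => simpa [garoUpBody] using ih

lemma getD_setD (e : List Int) (q p v : Int) (hq : 0 ≤ q)
    (hp : 0 ≤ p) (hplt : p < (e.length : Int)) :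
    PySem.List.pyGetD (PySem.List.pySetD e q v) p 0
      = if p = q then v else PySem.List.pyGetD e p 0 := by
  rw [PySem.List.pySetD_of_nonneg e v hq,
      PySem.List.pyGetD_eq_getElem (e.set q.toNat v) 0 hp (by simpa using hplt),
      PySem.List.pyGetD_eq_getElem e 0 hp hplt]
  rw [List.getElem_set]
  split_ifs with h1 h2 h2 <;> first | rfl | omega

lemma innerUpAux (row : List Int) (h j : Int) :
  ∀ (t : Nat) (e : List Int) (ES : Int → Bool),
    0 ≤ j - t → j ≤ (e.length : Int) →
    (∀ p : Int, 0 ≤ p → p < (e.length : Int) → PySem.List.pyGetD e p 0 = if ES p then 1 else 0) →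
    (((PySem.List.pyRange t 0 (-1)).foldl (garoUpBody row j h) (e, true)).2
       = decide (∀ k : Int, 1 ≤ k → k ≤ t → (PySem.List.pyGetD row (j - k) 0 = h ∧ ES (j - k) = false)))
    ∧ (((PySem.List.pyRange t 0 (-1)).foldl (garoUpBody row j h) (e, true)).2 = true →
        (((PySem.List.pyRange t 0 (-1)).foldl (garoUpBody row j h) (e, true)).1.length = e.length ∧
         ∀ p : Int, 0 ≤ p → p < (e.length : Int) →
           PySem.List.pyGetD ((PySem.List.pyRange t 0 (-1)).foldl (garoUpBody row j h) (e, true)).1 p 0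
             = if (j - t ≤ p ∧ p < j) ∨ ES p = true then 1 else 0)) := by
  intro t
  induction t with
  | zero =>
    intro e ES hjt hjlen he
    rw [PySem.List.pyRange_neg_one_eq_nil (by norm_num)]
    simp only [List.foldl_nil]
    constructor
    · symm
      simp only [decide_eq_true_eq]
      intro k h1k hk
      exact absurd h1k (by push_cast at hk; omega)
    · intro _
      constructor
      · trivial
      · intro p hp hplt
        rw [he p hp hplt]
        by_cases hES : ES p <;> simp [hES] <;> omega
  | succ t ih =>
    intro e ES hjt hjlen he
    push_cast at hjt ⊢
    have hcons : PySem.List.pyRange ((t : Int) + 1) 0 (-1)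
        = ((t : Int) + 1) :: PySem.List.pyRange (t : Int) 0 (-1) := by
      have h1 : ((t : Int) + 1) - 1 = (t : Int) := by ring
      rw [PySem.List.pyRange_neg_one_cons (by omega), h1]
    rw [hcons]
    set q : Int := j - ((t : Int) + 1) with hqdef
    have hq0 : 0 ≤ q := by omega
    have hqlt : q < (e.length : Int) := by omega
    have heq : PySem.List.pyGetD e q 0 = if ES q then 1 else 0 := he q hq0 hqlt
    by_cases hfail : PySem.List.pyGetD row q 0 ≠ h ∨ PySem.List.pyGetD e q 0 = 1
    · have hbody : garoUpBody row j h (e, true) ((t : Int) + 1) = (e, false) := by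
        simp only [garoUpBody, ← hqdef]
        simp [hfail]
      rw [List.foldl_cons, hbody, foldl_upBody_false]
      constructor
      · symm
        simp only [decide_eq_false_iff_not]
        intro hall
        have hthis := hall ((t : Int) + 1) (by omega) le_rfl
        rw [← hqdef] at hthis
        rcases hfail with hc | hm
        · exact hc hthis.1
        · rw [heq, hthis.2] at hm
          simp at hm
      · intro hcontra; simp at hcontra
    · push_neg at hfail
      obtain ⟨hcell, hmark⟩ := hfail
      have hESq : ES q = false := by
        rw [heq] at hmark
        by_cases hES : ES q
        · simp [hES] at hmark
        · simpa using hES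
      have hbody : garoUpBody row j h (e, true) ((t : Int) + 1)
          = (PySem.List.pySetD e q 1, true) := by
        simp only [garoUpBody, ← hqdef]
        rw [if_neg (by simp), if_neg (by push_neg; exact ⟨hcell, hmark⟩)]
      rw [List.foldl_cons, hbody]
      have hlen' : ((PySem.List.pySetD e q 1).length : Int) = (e.length : Int) := by
        rw [PySem.List.length_pySetD]
      have he' : ∀ p : Int, 0 ≤ p → p < ((PySem.List.pySetD e q 1).length : Int) →
          PySem.List.pyGetD (PySem.List.pySetD e q 1) p 0
            = if (decide (p = q) || ES p) then 1 else 0 := by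
        intro p hp hplt
        rw [hlen'] at hplt
        rw [getD_setD e q p 1 hq0 hp hplt]
        by_cases hpq : p = q
        · simp [hpq]
        · rw [if_neg hpq, he p hp hplt]
          by_cases hES : ES p <;> simp [hpq, hES]
      obtain ⟨ihflag, ihmark⟩ := ih (PySem.List.pySetD e q 1) (fun p => (decide (p = q) || ES p))
        (by omega) (by omega) he'
      constructor
      · rw [ihflag]
        apply decide_eq_decide.mpr
        constructor
        · intro hall k h1k hk
          by_cases hkt : k ≤ (t : Int)
          · have hth := hall k h1k hkt
            have hne : ¬ (j - k = q) := by omega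
            exact ⟨hth.1, by simpa [hne] using hth.2⟩
          · have hk1 : k = (t : Int) + 1 := by omega
            rw [hk1, ← hqdef]
            exact ⟨hcell, hESq⟩
        · intro hall k h1k hkt
          have hth := hall k h1k (by omega)
          have hne : ¬ (j - k = q) := by omega
          exact ⟨hth.1, by simp [hne, hth.2]⟩
      · intro hflag
        obtain ⟨hl, hm⟩ := ihmark hflag
        refine ⟨by rw [hl, PySem.List.length_pySetD], fun p hp hplt => ?_⟩
        rw [hm p hp (by omega)]
        have hiff : ((j - (t : Int) ≤ p ∧ p < j) ∨ (decide (p = q) || ES p) = true)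
            ↔ ((j - ((t : Int) + 1) ≤ p ∧ p < j) ∨ ES p = true) := by
          constructor
          · rintro (hint | hb)
            · left; omega
            · rcases Bool.or_eq_true_iff.mp hb with hb | hb
              · left
                have hpq : p = q := by simpa using hb
                omega
              · right; exact hb
          · rintro (hint | hb)
            · by_cases hpq : p = q
              · right; simp [hpq]
              · left; omega
            · right; simp [hb]
        rw [if_congr hiff rfl rfl]

lemma foldl_downBody_false (row : List Int) (j h : Int) (l : List Int) (e : List Int) :
    l.foldl (garoDownBody row j h) (e, false) = (e, false) := by
  induction l with
  | nil => rfl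
  | cons k l ih => simpa [garoDownBody] using ih

lemma innerDownAux (row : List Int) (h j L : Int) :
  ∀ (t : Nat) (e : List Int) (ES : Int → Bool),
    0 ≤ L - t → 0 ≤ j → j + L ≤ (e.length : Int) →
    (∀ p : Int, 0 ≤ p → p < (e.length : Int) → PySem.List.pyGetD e p 0 = if ES p then 1 else 0) →
    (((PySem.List.pyRange (L - t) L 1).foldl (garoDownBody row j h) (e, true)).2
       = decide (∀ k : Int, L - t ≤ k → k < L → (PySem.List.pyGetD row (j + k) 0 = h - 1 ∧ ES (j + k) = false)))
    ∧ (((PySem.List.pyRange (L - t) L 1).foldl (garoDownBody row j h) (e, true)).2 = true →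
        (((PySem.List.pyRange (L - t) L 1).foldl (garoDownBody row j h) (e, true)).1.length = e.length ∧
         ∀ p : Int, 0 ≤ p → p < (e.length : Int) →
           PySem.List.pyGetD ((PySem.List.pyRange (L - t) L 1).foldl (garoDownBody row j h) (e, true)).1 p 0
             = if (j + (L - t) ≤ p ∧ p < j + L) ∨ ES p = true then 1 else 0)) := by
  intro t
  induction t with
  | zero =>
    intro e ES hLt hj hjlen he
    rw [PySem.List.pyRange_one_eq_nil (by push_cast; omega)]
    simp only [List.foldl_nil]
    constructor
    · symm
      simp only [decide_eq_true_eq]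
      intro k h1k hk
      exact absurd h1k (by push_cast; omega)
    · intro _
      constructor
      · trivial
      · intro p hp hplt
        rw [he p hp hplt]
        by_cases hES : ES p <;> simp [hES] <;> omega
  | succ t ih =>
    intro e ES hLt hj hjlen he
    push_cast at hLt ⊢
    have hcons : PySem.List.pyRange (L - ((t : Int) + 1)) L 1
        = (L - ((t : Int) + 1)) :: PySem.List.pyRange (L - (t : Int)) L 1 := by
      have h1 : L - ((t : Int) + 1) + 1 = L - (t : Int) := by ring
      rw [PySem.List.pyRange_one_cons (by omega), h1]
    rw [hcons]
    set q : Int := j + (L - ((t : Int) + 1)) with hqdef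
    have hq0 : 0 ≤ q := by omega
    have hqlt : q < (e.length : Int) := by omega
    have heq : PySem.List.pyGetD e q 0 = if ES q then 1 else 0 := he q hq0 hqlt
    by_cases hfail : PySem.List.pyGetD row q 0 ≠ h - 1 ∨ PySem.List.pyGetD e q 0 = 1
    · have hbody : garoDownBody row j h (e, true) (L - ((t : Int) + 1)) = (e, false) := by
        simp only [garoDownBody, ← hqdef]
        simp [hfail]
      rw [List.foldl_cons, hbody, foldl_downBody_false]
      constructor
      · symm
        simp only [decide_eq_false_iff_not]
        intro hall
        have hthis := hall (L - ((t : Int) + 1)) le_rfl (by omega)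
        rw [← hqdef] at hthis
        rcases hfail with hc | hm
        · exact hc hthis.1
        · rw [heq, hthis.2] at hm
          simp at hm
      · intro hcontra; simp at hcontra
    · push_neg at hfail
      obtain ⟨hcell, hmark⟩ := hfail
      have hESq : ES q = false := by
        rw [heq] at hmark
        by_cases hES : ES q
        · simp [hES] at hmark
        · simpa using hES
      have hbody : garoDownBody row j h (e, true) (L - ((t : Int) + 1))
          = (PySem.List.pySetD e q 1, true) := by
        simp only [garoDownBody, ← hqdef]
        rw [if_neg (by simp), if_neg (by push_neg; exact ⟨hcell, hmark⟩)]
      rw [List.foldl_cons, hbody]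
      have hlen' : ((PySem.List.pySetD e q 1).length : Int) = (e.length : Int) := by
        rw [PySem.List.length_pySetD]
      have he' : ∀ p : Int, 0 ≤ p → p < ((PySem.List.pySetD e q 1).length : Int) →
          PySem.List.pyGetD (PySem.List.pySetD e q 1) p 0
            = if (decide (p = q) || ES p) then 1 else 0 := by
        intro p hp hplt
        rw [hlen'] at hplt
        rw [getD_setD e q p 1 hq0 hp hplt]
        by_cases hpq : p = q
        · simp [hpq]
        · rw [if_neg hpq, he p hp hplt]
          by_cases hES : ES p <;> simp [hpq, hES]
      obtain ⟨ihflag, ihmark⟩ := ih (PySem.List.pySetD e q 1) (fun p => (decide (p = q) || ES p))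
        (by omega) hj (by omega) he'
      constructor
      · rw [ihflag]
        apply decide_eq_decide.mpr
        constructor
        · intro hall k h1k hk
          by_cases hkt : L - (t : Int) ≤ k
          · have hth := hall k hkt hk
            have hne : ¬ (j + k = q) := by omega
            exact ⟨hth.1, by simpa [hne] using hth.2⟩
          · have hk1 : k = L - ((t : Int) + 1) := by omega
            rw [hk1, ← hqdef]
            exact ⟨hcell, hESq⟩
        · intro hall k h1k hkt
          have hth := hall k (by omega) hkt
          have hne : ¬ (j + k = q) := by omega
          exact ⟨hth.1, by simp [hne, hth.2]⟩
      · intro hflag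
        obtain ⟨hl, hm⟩ := ihmark hflag
        refine ⟨by rw [hl, PySem.List.length_pySetD], fun p hp hplt => ?_⟩
        rw [hm p hp (by omega)]
        have hiff : ((j + (L - (t : Int)) ≤ p ∧ p < j + L) ∨ (decide (p = q) || ES p) = true)
            ↔ ((j + (L - ((t : Int) + 1)) ≤ p ∧ p < j + L) ∨ ES p = true) := by
          constructor
          · rintro (hint | hb)
            · left; omega
            · rcases Bool.or_eq_true_iff.mp hb with hb | hb
              · left
                have hpq : p = q := by simpa using hb
                omega
              · right; exact hb
          · rintro (hint | hb)
            · by_cases hpq : p = q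
              · right; simp [hpq]
              · left; omega
            · right; simp [hb]
        rw [if_congr hiff rfl rfl]

lemma foldl_garoBody_false (N L : Int) (row : List Int) (l : List Int) (h : Int) (e : List Int) :
    l.foldl (garoBody N L row) (h, e, false) = (h, e, false) := by
  induction l with
  | nil => rfl
  | cons j l ih => simpa [garoBody] using ih

lemma innerUpInt (row : List Int) (h j L : Int) (e : List Int) (ES : Int → Bool)
    (hjL : 0 ≤ j - L) (hjlen : j ≤ (e.length : Int))
    (he : ∀ p : Int, 0 ≤ p → p < (e.length : Int) → PySem.List.pyGetD e p 0 = if ES p then 1 else 0) :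
    (((PySem.List.pyRange L 0 (-1)).foldl (garoUpBody row j h) (e, true)).2
       = decide (∀ k : Int, 1 ≤ k → k ≤ L → (PySem.List.pyGetD row (j - k) 0 = h ∧ ES (j - k) = false)))
    ∧ (((PySem.List.pyRange L 0 (-1)).foldl (garoUpBody row j h) (e, true)).2 = true →
        (((PySem.List.pyRange L 0 (-1)).foldl (garoUpBody row j h) (e, true)).1.length = e.length ∧
         ∀ p : Int, 0 ≤ p → p < (e.length : Int) →
           PySem.List.pyGetD ((PySem.List.pyRange L 0 (-1)).foldl (garoUpBody row j h) (e, true)).1 p 0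
             = if (j - L ≤ p ∧ p < j) ∨ ES p = true then 1 else 0)) := by
  rcases (by omega : L ≤ 0 ∨ 0 < L) with hL | hL
  · rw [PySem.List.pyRange_neg_one_eq_nil hL]
    simp only [List.foldl_nil]
    constructor
    · symm
      simp only [decide_eq_true_eq]
      intro k h1k hk
      exact absurd h1k (by omega)
    · intro _
      constructor
      · trivial
      · intro p hp hplt
        rw [he p hp hplt]
        by_cases hES : ES p <;> simp [hES] <;> omega
  · have hLt : ((L.toNat : Int)) = L := Int.toNat_of_nonneg (by omega)
    have := innerUpAux row h j L.toNat e ES (by omega) hjlen he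
    rw [hLt] at this
    exact this

lemma innerDownInt (row : List Int) (h j L : Int) (e : List Int) (ES : Int → Bool)
    (hj : 0 ≤ j) (hjlen : j + L ≤ (e.length : Int))
    (he : ∀ p : Int, 0 ≤ p → p < (e.length : Int) → PySem.List.pyGetD e p 0 = if ES p then 1 else 0) :
    (((PySem.List.pyRange 0 L 1).foldl (garoDownBody row j h) (e, true)).2
       = decide (∀ k : Int, 0 ≤ k → k < L → (PySem.List.pyGetD row (j + k) 0 = h - 1 ∧ ES (j + k) = false)))
    ∧ (((PySem.List.pyRange 0 L 1).foldl (garoDownBody row j h) (e, true)).2 = true →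
        (((PySem.List.pyRange 0 L 1).foldl (garoDownBody row j h) (e, true)).1.length = e.length ∧
         ∀ p : Int, 0 ≤ p → p < (e.length : Int) →
           PySem.List.pyGetD ((PySem.List.pyRange 0 L 1).foldl (garoDownBody row j h) (e, true)).1 p 0
             = if (j ≤ p ∧ p < j + L) ∨ ES p = true then 1 else 0)) := by
  rcases (by omega : L ≤ 0 ∨ 0 < L) with hL | hL
  · rw [PySem.List.pyRange_one_eq_nil hL]
    simp only [List.foldl_nil]
    constructor
    · symm
      simp only [decide_eq_true_eq]
      intro k h1k hk
      exact absurd h1k (by omega)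
    · intro _
      constructor
      · trivial
      · intro p hp hplt
        rw [he p hp hplt]
        by_cases hES : ES p <;> simp [hES] <;> omega
  · have hLt : ((L.toNat : Int)) = L := Int.toNat_of_nonneg (by omega)
    have h0 : L - ((L.toNat : Int)) = 0 := by omega
    have := innerDownAux row h j L L.toNat e ES (by omega) hj hjlen he
    rw [h0] at this
    have hsub : j + (0 : Int) = j := by ring
    simpa [hLt, hsub] using this

lemma flatFold (N L : Int) (row : List Int) (h : Int) :
    ∀ (t : Nat) (a : Int) (e : List Int),
      (∀ j : Int, a ≤ j → j < a + t → PySem.List.pyGetD row j 0 = h) →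
      (PySem.List.pyRange a (a + t) 1).foldl (garoBody N L row) (h, e, true) = (h, e, true) := by
  intro t
  induction t with
  | zero =>
    intro a e _
    rw [show a + ((0:Nat) : Int) = a by push_cast; ring, PySem.List.pyRange_one_eq_nil le_rfl]
    rfl
  | succ t ih =>
    intro a e hcells
    push_cast
    have hcons : PySem.List.pyRange a (a + ((t : Int) + 1)) 1
        = a :: PySem.List.pyRange (a + 1) (a + ((t : Int) + 1)) 1 :=
      PySem.List.pyRange_one_cons (by omega)
    rw [hcons, List.foldl_cons]
    have hx : PySem.List.pyGetD row a 0 = h := hcells a le_rfl (by push_cast; omega)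
    have hbody : garoBody N L row (h, e, true) a = (h, e, true) := by
      simp only [garoBody, hx]
      rw [if_neg (by simp), if_neg (by simp), if_neg (by norm_num), if_neg (by norm_num)]
    rw [hbody, show a + ((t : Int) + 1) = (a + 1) + (t : Int) by ring]
    exact ih (a + 1) e (fun j hj hjt => hcells j (by omega) (by push_cast at hjt ⊢; omega))

def chkRuns (L : Int) : Bool → List (Int × Int) → Bool
  | _, [] => true
  | cl, (h, ln) :: rs =>
    match rs with
    | [] => true
    | (h2, l2) :: _ =>
      if h2 = h + 1 then ((decide (L ≤ ln)) && (!cl || decide (2*L ≤ ln))) && chkRuns L false rs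
      else if h2 = h - 1 then (decide (L ≤ l2)) && chkRuns L true rs
      else false

def RunsAt (row : List Int) (n : Int) : Int → List (Int × Int) → Prop
  | b, [] => b = n
  | b, (h2, l2) :: rest =>
      1 ≤ l2 ∧ b + l2 ≤ n ∧
      (∀ j : Int, b ≤ j → j < b + l2 → PySem.List.pyGetD row j 0 = h2) ∧
      (∀ h3 l3 rest', rest = (h3, l3) :: rest' → h3 ≠ h2) ∧
      RunsAt row n (b + l2) rest

lemma mainLoop (n L : Int) (row : List Int) :
    ∀ (rs : List (Int × Int)) (b h ln0 : Int) (cl : Bool) (e : List Int) (ES : Int → Bool),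
      0 ≤ b → b ≤ n →
      1 ≤ ln0 → ln0 ≤ b →
      (∀ j : Int, b - ln0 ≤ j → j < b → PySem.List.pyGetD row j 0 = h) →
      (0 ≤ b - ln0 - 1 → PySem.List.pyGetD row (b - ln0 - 1) 0 ≠ h) →
      (∀ h2 l2 rest, rs = (h2, l2) :: rest → h2 ≠ h) →
      RunsAt row n b rs →
      ((e.length : Int) = n) →
      (∀ p : Int, 0 ≤ p → p < (e.length : Int) → PySem.List.pyGetD e p 0 = if ES p then 1 else 0) →
      (∀ p : Int, b - ln0 ≤ p → p < b → ES p = (cl && decide (p < b - ln0 + L))) →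
      (∀ p : Int, b ≤ p → p < n → ES p = false) →
      ((PySem.List.pyRange b n 1).foldl (garoBody n L row) (h, e, true)).2.2
        = chkRuns L cl ((h, ln0) :: rs) := by
  intro rs
  induction rs with
  | nil =>
    intro b h ln0 cl e ES hb0 hbn hln1 hlnb hc0 hbef hhead hRA helen he hES2 hES3
    have hbn' : b = n := hRA
    rw [hbn', PySem.List.pyRange_one_eq_nil le_rfl]
    simp [chkRuns]
  | cons run rest ih =>
    obtain ⟨h2, l2⟩ := run
    intro b h ln0 cl e ES hb0 hbn hln1 hlnb hc0 hbef hhead hRA helen he hES2 hES3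
    obtain ⟨hl21, hbl2, hcells2, hdist, hRA'⟩ := hRA
    have hne : h2 ≠ h := hhead h2 l2 rest rfl
    have hxb : PySem.List.pyGetD row b 0 = h2 := hcells2 b le_rfl (by omega)
    have hsplit : PySem.List.pyRange b n 1
        = b :: (PySem.List.pyRange (b+1) (b+l2) 1 ++ PySem.List.pyRange (b+l2) n 1) := by
      rw [PySem.List.pyRange_one_append b (b+l2) n (by omega) (by omega),
          PySem.List.pyRange_one_cons (by omega), List.cons_append]
    rw [hsplit, List.foldl_cons, List.foldl_append]
    have habs_iff : (1 < |h2 - h|) ↔ (1 < h2 - h ∨ h2 - h < -1) := by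
      rw [lt_abs]; omega
    rcases (by omega : 1 < h2 - h ∨ h2 - h < -1 ∨ h2 = h + 1 ∨ h2 = h - 1) with habs | habs | hup | hdn
    · -- |height step| > 1 : fail
      have hgb : garoBody n L row (h, e, true) b = (h, e, false) := by
        simp only [garoBody, hxb]
        rw [if_neg (by simp), if_pos (habs_iff.mpr (Or.inl habs))]
      rw [hgb, foldl_garoBody_false, foldl_garoBody_false]
      simp only [chkRuns]
      rw [if_neg (by omega), if_neg (by omega)]
    · have hgb : garoBody n L row (h, e, true) b = (h, e, false) := by
        simp only [garoBody, hxb]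
        rw [if_neg (by simp), if_pos (habs_iff.mpr (Or.inr habs))]
      rw [hgb, foldl_garoBody_false, foldl_garoBody_false]
      simp only [chkRuns]
      rw [if_neg (by omega), if_neg (by omega)]
    · -- up-step
      have hnabs : ¬ (1 < |h2 - h|) := by rw [habs_iff]; omega
      have hx1 : h2 - h = 1 := by omega
      by_cases hguard : b - L < 0
      · have hgb : garoBody n L row (h, e, true) b = (h, e, false) := by
          simp only [garoBody, hxb]
          rw [if_neg (by simp), if_neg hnabs, if_pos hx1, if_pos hguard]
        rw [hgb, foldl_garoBody_false, foldl_garoBody_false]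
        simp only [chkRuns]
        rw [if_pos hup]
        have : decide (L ≤ ln0) = false := by simp; omega
        rw [this]
        simp
      · obtain ⟨hPflag, hPmark⟩ := innerUpInt row h b L e ES (by omega) (by omega) he
        have hflagval : ((PySem.List.pyRange L 0 (-1)).foldl (garoUpBody row b h) (e, true)).2
            = ((decide (L ≤ ln0)) && (!cl || decide (2*L ≤ ln0))) := by
          rw [hPflag]
          have hiff : (∀ k : Int, 1 ≤ k → k ≤ L →
              (PySem.List.pyGetD row (b - k) 0 = h ∧ ES (b - k) = false))
              ↔ (L ≤ ln0 ∧ (cl = true → 2*L ≤ ln0)) := by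
            constructor
            · intro hall
              have hLln : L ≤ ln0 := by
                by_contra hA
                have hk := (hall (ln0 + 1) (by omega) (by omega)).1
                rw [show b - (ln0 + 1) = b - ln0 - 1 by ring] at hk
                exact hbef (by omega) hk
              refine ⟨hLln, fun hcl => ?_⟩
              by_contra hB
              have hL1 : 1 ≤ L := by omega
              have hk := hall (ln0 - L + 1) (by omega) (by omega)
              have := hES2 (b - (ln0 - L + 1)) (by omega) (by omega)
              rw [hk.2, hcl] at this
              simp at this
              omega
            · rintro ⟨hA, hB⟩ k h1k hkL
              refine ⟨hc0 (b - k) (by omega) (by omega), ?_⟩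
              rw [hES2 (b - k) (by omega) (by omega)]
              cases hcl : cl
              · simp
              · have h2L : 2*L ≤ ln0 := hB hcl
                simp
                omega
          simp only [hiff]
          cases cl <;> simp
        cases hB : ((decide (L ≤ ln0)) && (!cl || decide (2*L ≤ ln0)))
        · have hgb : garoBody n L row (h, e, true) b
              = (h, ((PySem.List.pyRange L 0 (-1)).foldl (garoUpBody row b h) (e, true)).1, false) := by
            simp only [garoBody, hxb]
            rw [if_neg (by simp), if_neg hnabs, if_pos hx1, if_neg hguard,
                if_pos (by rw [hflagval, hB])]
          rw [hgb, foldl_garoBody_false, foldl_garoBody_false]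
          simp only [chkRuns]
          rw [if_pos hup, hB]
          simp
        · have hPtrue : ((PySem.List.pyRange L 0 (-1)).foldl (garoUpBody row b h) (e, true)).2 = true := by
            rw [hflagval, hB]
          have hgb : garoBody n L row (h, e, true) b
              = (h2, ((PySem.List.pyRange L 0 (-1)).foldl (garoUpBody row b h) (e, true)).1, true) := by
            simp only [garoBody, hxb]
            rw [if_neg (by simp), if_neg hnabs, if_pos hx1, if_neg hguard,
                if_neg (by rw [hPtrue]; simp)]
          obtain ⟨hlen1, hmark1⟩ := hPmark hPtrue
          set e1 : List Int := ((PySem.List.pyRange L 0 (-1)).foldl (garoUpBody row b h) (e, true)).1 with he1def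
          have helen1 : (e1.length : Int) = n := by rw [hlen1]; exact helen
          rw [hgb]
          have hflat : (PySem.List.pyRange (b+1) (b+l2) 1).foldl (garoBody n L row) (h2, e1, true)
              = (h2, e1, true) := by
            have hbl : b + l2 = (b + 1) + (((l2 - 1).toNat : Nat) : Int) := by omega
            rw [hbl]
            exact flatFold n L row h2 (l2 - 1).toNat (b+1) e1
              (fun j hj hjt => hcells2 j (by omega) (by omega))
          rw [hflat]
          have hresult := ih (b + l2) h2 l2 false e1
            (fun p => (decide (b - L ≤ p) && decide (p < b)) || ES p)
            (by omega) (by omega) hl21 (by omega)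
            (fun j hj hjt => hcells2 j (by omega) (by omega))
            (by
              intro hpos
              have : PySem.List.pyGetD row (b + l2 - l2 - 1) 0 = h :=
                hc0 _ (by omega) (by omega)
              rw [this]
              omega)
            (fun h3 l3 rest' hr => hdist h3 l3 rest' hr)
            hRA' helen1
            (by
              intro p hp hplt
              rw [hlen1] at hplt
              rw [hmark1 p hp hplt]
              by_cases hc : (b - L ≤ p ∧ p < b) ∨ ES p = true
              · rw [if_pos hc, if_pos (by
                  rcases hc with ⟨hc1, hc2⟩ | hc
                  · simp; omega
                  · simp [hc])]
              · rw [if_neg hc, if_neg (by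
                  simp only [Bool.or_eq_true, Bool.and_eq_true, decide_eq_true_eq]
                  intro hcon
                  exact hc (by tauto))]
            )
            (by
              intro p hp hplt
              have hES : ES p = false := hES3 p (by omega) (by omega)
              have h1 : decide (p < b) = false := by simp; omega
              simp [hES, h1])
            (by
              intro p hp hplt
              have hES : ES p = false := hES3 p (by omega) hplt
              have h1 : decide (p < b) = false := by simp; omega
              simp [h1, hES])
          rw [hresult]
          simp only [chkRuns]
          rw [if_pos hup, hB]
          simp
    · -- down-step
      have hnabs : ¬ (1 < |h2 - h|) := by rw [habs_iff]; omega
      have hxm1 : h2 - h = -1 := by omega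
      have hnx1 : ¬ (h2 - h = 1) := by omega
      have hnup : ¬ (h2 = h + 1) := by omega
      by_cases hguard : n ≤ b + L - 1
      · have hgb : garoBody n L row (h, e, true) b = (h, e, false) := by
          simp only [garoBody, hxb]
          rw [if_neg (by simp), if_neg hnabs, if_neg hnx1, if_pos hxm1, if_pos hguard]
        rw [hgb, foldl_garoBody_false, foldl_garoBody_false]
        simp only [chkRuns]
        rw [if_neg hnup, if_pos hdn]
        have : decide (L ≤ l2) = false := by simp; omega
        rw [this]
        simp
      · obtain ⟨hPflag, hPmark⟩ := innerDownInt row h b L e ES (by omega) (by omega) he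
        have hflagval : ((PySem.List.pyRange 0 L 1).foldl (garoDownBody row b h) (e, true)).2
            = decide (L ≤ l2) := by
          rw [hPflag]
          apply decide_eq_decide.mpr
          constructor
          · intro hall
            by_contra hA
            have hk := hall l2 (by omega) (by omega)
            rcases rest with _ | ⟨⟨h3, l3⟩, rest'⟩
            · have : b + l2 = n := hRA'
              omega
            · obtain ⟨hl31, hbl3, hcells3, _, _⟩ := hRA'
              have hcell3 : PySem.List.pyGetD row (b + l2) 0 = h3 :=
                hcells3 (b + l2) le_rfl (by omega)
              have hne3 : h3 ≠ h2 := hdist h3 l3 rest' rfl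
              rw [hcell3] at hk
              omega
          · intro hA k h0k hkL
            refine ⟨by rw [hcells2 (b + k) (by omega) (by omega)]; omega, ?_⟩
            exact hES3 (b + k) (by omega) (by omega)
        cases hB : decide (L ≤ l2)
        · have hgb : garoBody n L row (h, e, true) b
              = (h, ((PySem.List.pyRange 0 L 1).foldl (garoDownBody row b h) (e, true)).1, false) := by
            simp only [garoBody, hxb]
            rw [if_neg (by simp), if_neg hnabs, if_neg hnx1, if_pos hxm1, if_neg hguard,
                if_pos (by rw [hflagval, hB])]
          rw [hgb, foldl_garoBody_false, foldl_garoBody_false]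
          simp only [chkRuns]
          rw [if_neg hnup, if_pos hdn, hB]
          simp
        · have hLl2 : L ≤ l2 := by simpa using hB
          have hPtrue : ((PySem.List.pyRange 0 L 1).foldl (garoDownBody row b h) (e, true)).2 = true := by
            rw [hflagval, hB]
          have hgb : garoBody n L row (h, e, true) b
              = (h2, ((PySem.List.pyRange 0 L 1).foldl (garoDownBody row b h) (e, true)).1, true) := by
            simp only [garoBody, hxb]
            rw [if_neg (by simp), if_neg hnabs, if_neg hnx1, if_pos hxm1, if_neg hguard,
                if_neg (by rw [hPtrue]; simp)]
          obtain ⟨hlen1, hmark1⟩ := hPmark hPtrue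
          set e1 : List Int := ((PySem.List.pyRange 0 L 1).foldl (garoDownBody row b h) (e, true)).1 with he1def
          have helen1 : (e1.length : Int) = n := by rw [hlen1]; exact helen
          rw [hgb]
          have hflat : (PySem.List.pyRange (b+1) (b+l2) 1).foldl (garoBody n L row) (h2, e1, true)
              = (h2, e1, true) := by
            have hbl : b + l2 = (b + 1) + (((l2 - 1).toNat : Nat) : Int) := by omega
            rw [hbl]
            exact flatFold n L row h2 (l2 - 1).toNat (b+1) e1
              (fun j hj hjt => hcells2 j (by omega) (by omega))
          rw [hflat]
          have hresult := ih (b + l2) h2 l2 true e1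
            (fun p => (decide (b ≤ p) && decide (p < b + L)) || ES p)
            (by omega) (by omega) hl21 (by omega)
            (fun j hj hjt => hcells2 j (by omega) (by omega))
            (by
              intro hpos
              have : PySem.List.pyGetD row (b + l2 - l2 - 1) 0 = h :=
                hc0 _ (by omega) (by omega)
              rw [this]
              omega)
            (fun h3 l3 rest' hr => hdist h3 l3 rest' hr)
            hRA' helen1
            (by
              intro p hp hplt
              rw [hlen1] at hplt
              rw [hmark1 p hp hplt]
              by_cases hc : (b ≤ p ∧ p < b + L) ∨ ES p = true
              · rw [if_pos hc, if_pos (by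
                  rcases hc with ⟨hc1, hc2⟩ | hc
                  · simp; omega
                  · simp [hc])]
              · rw [if_neg hc, if_neg (by
                  simp only [Bool.or_eq_true, Bool.and_eq_true, decide_eq_true_eq]
                  intro hcon
                  exact hc (by tauto))]
            )
            (by
              intro p hp hplt
              have hES : ES p = false := hES3 p (by omega) (by omega)
              have h1 : decide (b ≤ p) = true := by simp; omega
              have h2 : b + l2 - l2 + L = b + L := by ring
              simp [hES, h1, h2])
            (by
              intro p hp hplt
              have hES : ES p = false := hES3 p (by omega) hplt
              have h1 : decide (p < b + L) = false := by simp; omega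
              simp [h1, hES])
          rw [hresult]
          simp only [chkRuns]
          rw [if_neg hnup, if_pos hdn, hB]
          simp

lemma pvRuns_nil_iff : ∀ l : List Int, pvRuns l = [] ↔ l = [] := by
  intro l
  cases l with
  | nil => simp [pvRuns]
  | cons x xs => simp [pvRuns]

lemma pvRuns_lengths : ∀ l : List Int, ∀ q ∈ pvRuns l, 1 ≤ q.2 := by
  intro l
  induction l using pvRuns.induct with
  | case1 => simp [pvRuns]
  | case2 x xs ih =>
    intro q hq
    rw [pvRuns] at hq
    rcases List.mem_cons.mp hq with hq | hq
    · rw [hq]; simp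
    · exact ih q hq

lemma getElem_eq_of_listEq (xs l' : List Int) (heq : xs = l') (i : Nat) (h : i < xs.length) :
    xs[i]'h = l'[i]'(heq ▸ h) := by
  subst heq; rfl

lemma toRunsAt (row : List Int) (n : Int) :
    ∀ (rs : List (Int × Int)) (l : List Int) (b : Int), pvRuns l = rs → 0 ≤ b →
      b + (l.length : Int) = n →
      (∀ (i : Nat) (hil : i < l.length), PySem.List.pyGetD row (b + (i : Int)) 0 = l[i]) →
      RunsAt row n b rs := by
  intro rs
  induction rs with
  | nil =>
    intro l b hruns hb0 hbn hcell
    have hl : l = [] := (pvRuns_nil_iff l).mp hruns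
    subst hl
    simp at hbn
    simpa [RunsAt] using hbn
  | cons run rest ih =>
    obtain ⟨h2, l2⟩ := run
    intro l b hruns hb0 hbn hcell
    cases l with
    | nil => rw [pvRuns] at hruns; exact absurd hruns (by simp)
    | cons x xs =>
      rw [pvRuns] at hruns
      injection hruns with hpair hrest
      have hx : x = h2 := congrArg Prod.fst hpair
      have hl2 : 1 + ((xs.takeWhile (fun y => y == x)).length : Int) = l2 :=
        congrArg Prod.snd hpair
      subst hx
      subst hl2
      have htwdw : xs.takeWhile (fun y => y == x) ++ xs.dropWhile (fun y => y == x) = xs :=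
        List.takeWhile_append_dropWhile
      have hlen : xs.length
          = (xs.takeWhile (fun y => y == x)).length + (xs.dropWhile (fun y => y == x)).length := by
        conv_lhs => rw [← htwdw]
        rw [List.length_append]
      have hbn' : b + 1 + ((xs.length : Nat) : Int) = n := by
        simp only [List.length_cons] at hbn
        push_cast at hbn ⊢
        omega
      have hl21 : (1:Int) ≤ 1 + ((xs.takeWhile (fun y => y == x)).length : Int) := by omega
      have hbl2 : b + (1 + ((xs.takeWhile (fun y => y == x)).length : Int)) ≤ n := by omega
      have hcellx : ∀ (i : Nat) (hi : i < 1 + (xs.takeWhile (fun y => y == x)).length),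
          (x :: xs)[i]'(by simp; omega) = x := by
        intro i hi
        match i with
        | 0 => simp
        | Nat.succ i' =>
          have hi' : i' < (xs.takeWhile (fun y => y == x)).length := by omega
          have h1 : (x :: xs)[i' + 1]'(by simp; omega) = xs[i']'(by omega) := by simp
          have h2 : xs[i']'(by omega)
              = (xs.takeWhile (fun y => y == x) ++ xs.dropWhile (fun y => y == x))[i']'(by rw [htwdw]; omega) :=
            getElem_eq_of_listEq xs _ htwdw.symm i' (by omega)
          have h3 : (xs.takeWhile (fun y => y == x) ++ xs.dropWhile (fun y => y == x))[i']'(by rw [htwdw]; omega)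
              = (xs.takeWhile (fun y => y == x))[i']'hi' := List.getElem_append_left hi'
          rw [h1, h2, h3]
          have hmm : (xs.takeWhile (fun y => y == x))[i'] ∈ xs.takeWhile (fun y => y == x) :=
            List.getElem_mem _
          have := List.mem_takeWhile_imp hmm
          simpa using this
      refine ⟨hl21, hbl2, ?_, ?_, ?_⟩
      · intro j hj hjlt
        have hilt : (j - b).toNat < (x :: xs).length := by
          simp only [List.length_cons]
          omega
        have hcc := hcell (j - b).toNat hilt
        rw [show b + (((j - b).toNat : Nat) : Int) = j by omega] at hcc
        rw [hcc]
        apply hcellx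
        omega
      · intro h3 l3 rest' hr
        rw [hr] at hrest
        cases hdwc : xs.dropWhile (fun y => y == x) with
        | nil => rw [hdwc, pvRuns] at hrest; exact absurd hrest (by simp)
        | cons y ys =>
          rw [hdwc, pvRuns] at hrest
          injection hrest with hpair2 _
          have hy : h3 = y := (congrArg Prod.fst hpair2).symm
          have hne : xs.dropWhile (fun y => y == x) ≠ [] := by rw [hdwc]; simp
          have hpy := List.head_dropWhile_not (l := xs) (fun y => y == x) hne
          have hhead : (xs.dropWhile (fun y => y == x)).head hne = y := by
            have h0 : (xs.dropWhile (fun y => y == x)).head? = some y := by rw [hdwc]; rfl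
            rw [List.head?_eq_head hne] at h0
            exact Option.some.inj h0
          rw [hhead] at hpy
          rw [hy]
          simpa using hpy
      · apply ih (xs.dropWhile (fun y => y == x)) (b + (1 + ((xs.takeWhile (fun y => y == x)).length : Int)))
          hrest (by omega) (by omega)
        intro i hilt
        have hidx : 1 + (xs.takeWhile (fun y => y == x)).length + i < (x :: xs).length := by
          simp only [List.length_cons]
          omega
        have hcc := hcell (1 + (xs.takeWhile (fun y => y == x)).length + i) hidx
        rw [show b + (((1 + (xs.takeWhile (fun y => y == x)).length + i : Nat)) : Int)
            = b + (1 + ((xs.takeWhile (fun y => y == x)).length : Int)) + (i : Int) by push_cast; ring] at hcc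
        rw [hcc]
        have h1 : (x :: xs)[1 + (xs.takeWhile (fun y => y == x)).length + i]'hidx
            = xs[(xs.takeWhile (fun y => y == x)).length + i]'(by omega) := by
          have he' : 1 + (xs.takeWhile (fun y => y == x)).length + i
              = ((xs.takeWhile (fun y => y == x)).length + i) + 1 := by omega
          simp only [he', List.getElem_cons_succ]
        rw [h1]
        have h2a : xs[(xs.takeWhile (fun y => y == x)).length + i]'(by omega)
            = (xs.takeWhile (fun y => y == x) ++ xs.dropWhile (fun y => y == x))[(xs.takeWhile (fun y => y == x)).length + i]'(by rw [htwdw]; omega) :=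
          getElem_eq_of_listEq xs _ htwdw.symm _ (by omega)
        have h2b : (xs.takeWhile (fun y => y == x) ++ xs.dropWhile (fun y => y == x))[(xs.takeWhile (fun y => y == x)).length + i]'(by rw [htwdw]; omega)
            = (xs.dropWhile (fun y => y == x))[i]'hilt := by
          rw [List.getElem_append_right (by omega)]
          congr 1
          omega
        rw [h2a, h2b]

lemma pvLenOk_cons2_none (L : Int) (h ln h2 l2 : Int) (rest' : List (Int × Int)) :
    pvLenOk L none ((h, ln) :: (h2, l2) :: rest')
      = ((decide ((0 + (if h < h2 then L else 0)) ≤ ln))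
          && pvLenOk L (some h) ((h2, l2) :: rest')) := rfl

lemma pvLenOk_cons2_some (L : Int) (p h ln h2 l2 : Int) (rest' : List (Int × Int)) :
    pvLenOk L (some p) ((h, ln) :: (h2, l2) :: rest')
      = ((decide (((if h < p then L else 0) + (if h < h2 then L else 0)) ≤ ln))
          && pvLenOk L (some h) ((h2, l2) :: rest')) := rfl

lemma pvLenOk_sing_none (L : Int) (h ln : Int) :
    pvLenOk L none [(h, ln)] = decide ((0 + 0 : Int) ≤ ln) := by
  simp [pvLenOk]

lemma pvLenOk_sing_some (L : Int) (p h ln : Int) :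
    pvLenOk L (some p) [(h, ln)] = decide (((if h < p then L else 0) + 0) ≤ ln) := by
  simp [pvLenOk]

lemma chk_eq_lenOk (L : Int) :
    ∀ (rs : List (Int × Int)) (h ln : Int) (cl : Bool) (p? : Option Int),
      1 ≤ ln → (∀ q ∈ rs, 1 ≤ q.2) →
      ((match p? with | some p => decide (h < p) | none => false) = cl) →
      ((if cl then decide (L ≤ ln) else true) && chkRuns L cl ((h, ln) :: rs))
        = (pvAdjOk ((h, ln) :: rs) && pvLenOk L p? ((h, ln) :: rs)) := by
  intro rs
  induction rs with
  | nil =>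
    intro h ln cl p? hln _ hp
    simp only [chkRuns, pvAdjOk, Bool.and_true, Bool.true_and]
    cases p? with
    | none =>
      simp only at hp
      rw [← hp, pvLenOk_sing_none]
      simp
      omega
    | some p =>
      simp only at hp
      rw [← hp, pvLenOk_sing_some]
      by_cases hlt : h < p
      · simp [hlt]
      · simp [hlt]
        omega
  | cons run rest' ih =>
    obtain ⟨h2, l2⟩ := run
    intro h ln cl p? hln hlens hp
    have hl21 : 1 ≤ l2 := hlens (h2, l2) (List.mem_cons_self)
    have hlens' : ∀ q ∈ rest', 1 ≤ q.2 := fun q hq => hlens q (List.mem_cons_of_mem _ hq)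
    have hlen2 : pvLenOk L p? ((h, ln) :: (h2, l2) :: rest')
        = ((decide (((if cl then L else 0) + (if h < h2 then L else 0)) ≤ ln))
            && pvLenOk L (some h) ((h2, l2) :: rest')) := by
      cases p? with
      | none =>
        simp only at hp
        rw [← hp, pvLenOk_cons2_none]
        simp
      | some p =>
        simp only at hp
        rw [pvLenOk_cons2_some, ← hp]
        by_cases hlt : h < p
        · simp [hlt]
        · simp [hlt]
    rcases (by omega : h2 = h + 1 ∨ h2 = h - 1 ∨ (h2 ≠ h + 1 ∧ h2 ≠ h - 1)) with hup | hdn | hoth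
    · -- next run is one higher
      have hadj : (|h - h2| == 1) = true := by rw [hup]; simp
      have hih := ih h2 l2 false (some h) hl21 hlens' (by simp; omega)
      have hih' : chkRuns L false ((h2, l2) :: rest')
          = (pvAdjOk ((h2, l2) :: rest') && pvLenOk L (some h) ((h2, l2) :: rest')) := by
        simpa using hih
      have hchk : chkRuns L cl ((h, ln) :: (h2, l2) :: rest')
          = (((decide (L ≤ ln)) && (!cl || decide (2*L ≤ ln))) && chkRuns L false ((h2, l2) :: rest')) := by
        simp only [chkRuns]
        rw [if_pos hup]
      rw [hchk, hih', hlen2]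
      simp only [pvAdjOk, hadj, Bool.true_and]
      rw [if_pos (by omega : h < h2)]
      cases hP : pvAdjOk ((h2, l2) :: rest') <;>
        cases hQ : pvLenOk L (some h) ((h2, l2) :: rest') <;>
        cases cl <;>
        by_cases hA : L ≤ ln <;> by_cases hB : 2*L ≤ ln <;>
        by_cases hC : (if true then L else 0) + L ≤ ln <;>
        by_cases hC2 : (if false then L else 0) + L ≤ ln <;>
        simp [hA, hB, hC, hC2] <;> omega
    · -- next run is one lower
      have hadj : (|h - h2| == 1) = true := by rw [hdn]; simp
      have hih := ih h2 l2 true (some h) hl21 hlens' (by simp; omega)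
      rw [if_pos rfl] at hih
      have hchk : chkRuns L cl ((h, ln) :: (h2, l2) :: rest')
          = ((decide (L ≤ l2)) && chkRuns L true ((h2, l2) :: rest')) := by
        simp only [chkRuns]
        rw [if_neg (by omega), if_pos hdn]
      rw [hchk, hih, hlen2]
      simp only [pvAdjOk, hadj, Bool.true_and]
      rw [if_neg (by omega : ¬ h < h2)]
      cases hP : pvAdjOk ((h2, l2) :: rest') <;>
        cases hQ : pvLenOk L (some h) ((h2, l2) :: rest') <;>
        cases cl <;>
        by_cases hA : L ≤ ln <;>
        simp [hA] <;> omega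
    · -- height gap: both sides false
      have hadj : (|h - h2| == 1) = false := by
        simp only [beq_eq_false_iff_ne]
        intro hc
        rcases abs_eq (by norm_num : (0:Int) ≤ 1) |>.mp hc with hc | hc <;> omega
      have hchk : chkRuns L cl ((h, ln) :: (h2, l2) :: rest') = false := by
        simp only [chkRuns]
        rw [if_neg hoth.1, if_neg hoth.2]
      rw [hchk]
      simp [pvAdjOk, hadj]

lemma pyGetD_replicate (n : Nat) (p : Int) (hp : 0 ≤ p) (hplt : p < (n:Int)) :
    PySem.List.pyGetD (List.replicate n (0:Int)) p 0 = 0 := by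
  rw [PySem.List.pyGetD_eq_getElem _ 0 hp (by simpa using hplt)]
  exact List.getElem_replicate _

lemma rowFlag_eq (N L : Int) (row : List Int) (hN1 : 1 ≤ N) (hlen : N ≤ (row.length : Int)) :
    garoRowFlag N L row = pvRowOk L (PySem.List.slice row none (some N)) := by
  have hslice : PySem.List.slice row none (some N) = row.take N.toNat :=
    PySem.List.slice_to (xs := row) (by omega)
  rw [hslice]
  have hrlen : (row.take N.toNat).length = N.toNat := by simp; omega
  have hcell : ∀ (i : Nat) (hil : i < (row.take N.toNat).length),
      PySem.List.pyGetD row ((0:Int) + (i : Int)) 0 = (row.take N.toNat)[i] := by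
    intro i hil
    have hi2 : i < row.length := by omega
    rw [zero_add, PySem.List.pyGetD_natCast, List.getD_eq_getElem _ _ hi2]
    exact (List.getElem_take).symm
  cases hruns : pvRuns (row.take N.toNat) with
  | nil =>
    exfalso
    have := (pvRuns_nil_iff _).mp hruns
    have := congrArg List.length this
    simp [hrlen] at this
    omega
  | cons run rest =>
    obtain ⟨h1, l1⟩ := run
    have hRA : RunsAt row N 0 ((h1, l1) :: rest) := by
      apply toRunsAt row N _ (row.take N.toNat) 0 hruns le_rfl
      · rw [hrlen]; omega
      · exact hcell
    obtain ⟨hl11, h0l1, hcells1, hdist1, hRA'⟩ := hRA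
    have hx0 : PySem.List.pyGetD row 0 0 = h1 := hcells1 0 le_rfl (by omega)
    unfold garoRowFlag
    rw [hx0]
    rw [PySem.List.pyRange_one_append 0 l1 N (by omega) (by omega), List.foldl_append]
    have hflat : (PySem.List.pyRange 0 l1 1).foldl (garoBody N L row)
        (h1, List.replicate N.toNat (0:Int), true) = (h1, List.replicate N.toNat (0:Int), true) := by
      have h0l : l1 = (0:Int) + ((l1.toNat : Nat) : Int) := by omega
      rw [h0l]
      exact flatFold N L row h1 l1.toNat 0 _ (fun j hj hjt => hcells1 j hj (by omega))
    rw [hflat]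
    have hmain := mainLoop N L row rest l1 h1 l1 false (List.replicate N.toNat (0:Int))
      (fun _ => false)
      (by omega) (by omega) hl11 le_rfl
      (fun j hj hjt => hcells1 j (by omega) (by omega))
      (fun hcon => absurd hcon (by omega))
      (fun h3 l3 rest' hr => hdist1 h3 l3 rest' hr)
      (by rw [show l1 = 0 + l1 by ring]; exact hRA')
      (by simp; omega)
      (by
        intro p hp hplt
        rw [pyGetD_replicate N.toNat p hp (by simpa using hplt)]
        simp)
      (by intro p _ _; simp)
      (by intro p _ _; rfl)
    rw [hmain]
    have hlens : ∀ q ∈ rest, 1 ≤ q.2 := by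
      intro q hq
      exact pvRuns_lengths (row.take N.toNat) q (by rw [hruns]; exact List.mem_cons_of_mem _ hq)
    have hchk := chk_eq_lenOk L rest h1 l1 false none hl11 hlens (by simp)
    rw [if_neg (by simp), Bool.true_and] at hchk
    rw [hchk]
    rw [pvRowOk, hruns]

lemma foldl_count (f g : Int → Bool) :
    ∀ (l : List Int) (c d : Int), (∀ i ∈ l, f i = g i) →
      l.foldl (fun cnt i => if f i = false then cnt - 1 else cnt) c
        = c - (l.foldl (fun bad i => if g i then bad else bad + 1) d - d) := by
  intro l
  induction l with
  | nil => intro c d _; simp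
  | cons i l ih =>
    intro c d hfg
    have hfi : f i = g i := hfg i List.mem_cons_self
    have hfg' : ∀ j ∈ l, f j = g j := fun j hj => hfg j (List.mem_cons_of_mem _ hj)
    simp only [List.foldl_cons]
    cases hgi : g i
    · rw [hfi, hgi]
      norm_num
      rw [ih (c - 1) (d + 1) hfg']
      ring
    · rw [hfi, hgi]
      norm_num
      exact ih c d hfg'

lemma garo_eq_alt (N L : Int) (H : List (List Int))
    (hNH : N ≤ (H.length : Int)) (hrows : ∀ row ∈ H.take N.toNat, N ≤ (row.length : Int)) :
    garo N L H = garo_alt N L H := by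
  unfold garo garo_alt
  have hmain : ∀ i ∈ PySem.List.pyRange 0 N 1,
      garoRowFlag N L (PySem.List.pyGetD H i [])
        = pvRowOk L (PySem.List.slice (PySem.List.pyGetD H i []) none (some N)) := by
    intro i hi
    have hi' := (PySem.List.mem_pyRange_one).mp hi
    have hN1 : 1 ≤ N := by omega
    have hiH : i < (H.length : Int) := by omega
    have hrow : PySem.List.pyGetD H i [] = H[i.toNat]'(by omega) :=
      PySem.List.pyGetD_eq_getElem H [] (by omega) hiH
    have hmem : H[i.toNat]'(by omega) ∈ H.take N.toNat := by
      have hg : (H.take N.toNat)[i.toNat]'(by simp; omega) = H[i.toNat]'(by omega) :=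
        List.getElem_take
      rw [← hg]
      exact List.getElem_mem _
    have hlen := hrows _ hmem
    rw [hrow]
    exact rowFlag_eq N L _ hN1 hlen
  rw [foldl_count _ _ (PySem.List.pyRange 0 N 1) N 0 hmain, sub_zero]

-- ===== VERDICT (by name: the statement is the Claim_ definition above) =====
theorem garo_spec : Claim_equal_garo := by
  unfold Claim_equal_garo
  intro N L H _hdom hpre
  unfold Spec_garo
  exact garo_eq_alt N L H hpre.1 hpre.2
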